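-- pv_equiv track=rewrite | github.com/shall-ffn/esizzle | lambda/pdf-processor/processors/rotation_processor.py | validate_rotation_consistency
-- ===== SOURCE A (Python) =====
-- from typing import List, Dict, Any, Tuple
--
-- def validate_rotation_consistency(rotations: List[Dict[str, Any]]) -> List[str]:
--     """
--     Validate that rotations are consistent and don't conflict
--
--     Returns:
--         List of validation warnings/errors
--     """
--
--     issues = []
--     page_rotations = {}
--
--     for rotation in rotations:
--         page_index = rotation.get('PageIndex')
--         rotate_angle = rotation.get('Rotate')
--
--         if page_index in page_rotations:
--             previous_angle = page_rotations[page_index]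
--             if previous_angle != rotate_angle:
--                 issues.append(f"Conflicting rotations for page {page_index}: {previous_angle}° vs {rotate_angle}°")
--         else:
--             page_rotations[page_index] = rotate_angle
--
--     return issues
-- ===== SOURCE B (Python) =====
-- from typing import List, Dict, Any
--
-- def validate_rotation_consistency(rotations: List[Dict[str, Any]]) -> List[str]:
--     # Two-pass decomposition: first record the first angle seen per page index,
--     # then scan again and report every rotation that disagrees with it.
--     first_angle = {}
--     for rotation in rotations:
--         first_angle.setdefault(rotation.get('PageIndex'), rotation.get('Rotate'))
--     issues = []
--     for rotation in rotations:
--         page_index = rotation.get('PageIndex')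
--         rotate_angle = rotation.get('Rotate')
--         baseline = first_angle[page_index]
--         if baseline != rotate_angle:
--             issues.append(f"Conflicting rotations for page {page_index}: {baseline}° vs {rotate_angle}°")
--     return issues
-- ===== Notes on version B (the rewrite author's own statement) =====
-- stated objective: alternative
-- what changed: Replaces the single interleaved build-and-check loop by a two-pass decomposition: one setdefault pass records the first angle per page index, a second pass emits a conflict message for every rotation that disagrees with that stored first angle.
import Mathlib
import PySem

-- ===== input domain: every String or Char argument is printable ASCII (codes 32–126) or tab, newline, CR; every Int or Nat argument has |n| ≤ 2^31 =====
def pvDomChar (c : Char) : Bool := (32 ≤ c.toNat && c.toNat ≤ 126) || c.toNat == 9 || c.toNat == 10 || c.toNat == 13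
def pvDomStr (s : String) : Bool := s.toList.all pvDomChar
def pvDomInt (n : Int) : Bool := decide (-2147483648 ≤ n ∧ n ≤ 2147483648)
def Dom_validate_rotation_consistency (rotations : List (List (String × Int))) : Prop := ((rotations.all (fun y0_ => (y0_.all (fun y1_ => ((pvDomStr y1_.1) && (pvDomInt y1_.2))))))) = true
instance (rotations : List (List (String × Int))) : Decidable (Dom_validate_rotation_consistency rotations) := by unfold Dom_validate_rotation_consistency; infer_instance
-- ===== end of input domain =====

-- B differs from A by a two-pass decomposition (setdefault table, then a reporting scan); return values proved equal.

-- shared helpers: dict .get on a rotation record, str() of a possibly-None int, the f-string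
def rotKey (r : List (String × Int)) : Option Int := (PySem.Dict.ofList r).get? "PageIndex"
def rotVal (r : List (String × Int)) : Option Int := (PySem.Dict.ofList r).get? "Rotate"
def optIntStr : Option Int → String
  | none => "None"
  | some n => PySem.Int.toStr n
def conflictMsg (k p v : Option Int) : String :=
  "Conflicting rotations for page " ++ optIntStr k ++ ": " ++ optIntStr p ++ "° vs " ++ optIntStr v ++ "°"

-- ===== PORT A =====
-- one loop carrying (issues, page_rotations), exactly as A interleaves them
def stepA (st : List String × PySem.Dict (Option Int) (Option Int)) (r : List (String × Int)) :
    List String × PySem.Dict (Option Int) (Option Int) :=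
  let k := rotKey r
  let v := rotVal r
  match st.2.get? k with
  | some p => if p ≠ v then (st.1 ++ [conflictMsg k p v], st.2) else st
  | none => (st.1, st.2.insert k v)

def validate_rotation_consistency (rotations : List (List (String × Int))) : List String :=
  (rotations.foldl stepA ([], PySem.Dict.empty)).1

-- ===== PORT B =====
-- pass 1: setdefault table of first angles; pass 2: scan and report disagreements
def buildTable (t : PySem.Dict (Option Int) (Option Int)) (rotations : List (List (String × Int))) :
    PySem.Dict (Option Int) (Option Int) :=
  rotations.foldl (fun d r => d.setdefault (rotKey r) (rotVal r)) t

def emitB (table : PySem.Dict (Option Int) (Option Int)) (r : List (String × Int)) : Option String :=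
  let k := rotKey r
  let v := rotVal r
  match table.get? k with
  | some p => if p ≠ v then some (conflictMsg k p v) else none
  | none => none

def validate_rotation_consistency_alt (rotations : List (List (String × Int))) : List String :=
  let table := buildTable PySem.Dict.empty rotations
  rotations.filterMap (emitB table)

-- ===== PRECONDITION & SPEC =====
def Spec_validate_rotation_consistency (rotations : List (List (String × Int))) (out : List String) : Prop := out = validate_rotation_consistency_alt rotations
instance (rotations : List (List (String × Int))) (out : List String) : Decidable (Spec_validate_rotation_consistency rotations out) := by unfold Spec_validate_rotation_consistency; infer_instance

-- ===== CLAIM (what is proved, stated in full; the proofs are below) =====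
def Claim_equal_validate_rotation_consistency : Prop := ∀ (rotations : List (List (String × Int))), Dom_validate_rotation_consistency rotations → Spec_validate_rotation_consistency rotations (validate_rotation_consistency rotations)

-- ===== LEMMAS AND PROOFS =====

-- keys already present keep their value through the whole setdefault pass
theorem get?_buildTable_of_some (l : List (List (String × Int)))
    (t : PySem.Dict (Option Int) (Option Int)) (k p : Option Int)
    (h : t.get? k = some p) : (buildTable t l).get? k = some p := by
  induction l generalizing t with
  | nil => exact h
  | cons r l ih =>
    apply ih
    by_cases hk : rotKey r = k
    · subst hk
      simp [PySem.Dict.get?_setdefault_self, h]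
    · rw [PySem.Dict.get?_setdefault_of_ne t (rotVal r) (fun he => hk he.symm)]
      exact h

-- the interleaved loop equals: seed issues ++ reporting scan against the completed table
theorem loop_eq (l : List (List (String × Int))) (t : PySem.Dict (Option Int) (Option Int))
    (acc : List String) :
    (l.foldl stepA (acc, t)).1 = acc ++ l.filterMap (emitB (buildTable t l)) := by
  induction l generalizing t acc with
  | nil => simp
  | cons r l ih =>
    have hb : buildTable t (r :: l) = buildTable (t.setdefault (rotKey r) (rotVal r)) l := rfl
    cases hc : t.get? (rotKey r) with
    | some p =>
      have hsd : t.setdefault (rotKey r) (rotVal r) = t := by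
        apply PySem.Dict.setdefault_of_contains
        rw [PySem.Dict.contains_eq_isSome_get?, hc]; rfl
      have hget : (buildTable t l).get? (rotKey r) = some p :=
        get?_buildTable_of_some l t _ _ hc
      by_cases hne : p ≠ rotVal r
      · simp only [List.foldl_cons, stepA, hc, if_pos hne]
        rw [ih, hb, hsd, List.filterMap_cons]
        simp only [emitB, hget, if_pos hne, List.append_assoc, List.singleton_append]
      · simp only [List.foldl_cons, stepA, hc, if_neg hne]
        rw [ih, hb, hsd, List.filterMap_cons]
        simp only [emitB, hget, if_neg hne]
    | none =>
      have hsd : t.setdefault (rotKey r) (rotVal r) = t.insert (rotKey r) (rotVal r) := by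
        apply PySem.Dict.setdefault_of_not_contains
        rw [PySem.Dict.contains_eq_isSome_get?, hc]; rfl
      have hget : (buildTable (t.insert (rotKey r) (rotVal r)) l).get? (rotKey r)
          = some (rotVal r) :=
        get?_buildTable_of_some l _ _ _ (PySem.Dict.get?_insert_self _ _ _)
      simp only [List.foldl_cons, stepA, hc]
      rw [ih, hb, hsd, List.filterMap_cons]
      simp [emitB, hget]

-- ===== VERDICT (by name: the statement is the Claim_ definition above) =====
theorem validate_rotation_consistency_spec : Claim_equal_validate_rotation_consistency := by
  intro rotations _
  show validate_rotation_consistency rotations = validate_rotation_consistency_alt rotations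
  unfold validate_rotation_consistency validate_rotation_consistency_alt
  simpa using loop_eq rotations PySem.Dict.empty []
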